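-- pv_equiv track=rewrite | github.com/rcgalbo/advent-of-code-18 | day-7.py | build_dependency
-- ===== SOURCE A (Python) =====
-- from typing import Dict, Tuple, List, Set
--
-- def build_dependency(letters: List[str] , tups: List[Tuple[str,str]]):
--     depends = {}
--     for letter in letters:
--         depends[letter] = []
--         for tup in tups:
--             a,b = tup
--             if letter == b:
--                 depends[b] += a
--
--     return depends
-- ===== SOURCE B (Python) =====
-- def build_dependency(letters, tups):
--     index = {}
--     for a, b in tups:
--         index.setdefault(b, []).extend(a)
--     return {letter: list(index.get(letter, [])) for letter in letters}
-- ===== Notes on version B (the rewrite author's own statement) =====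
-- stated objective: faster
-- what changed: B builds a predecessor index in one pass over tups and then projects it onto letters, instead of rescanning the whole tuple list once per letter.
import Mathlib
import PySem

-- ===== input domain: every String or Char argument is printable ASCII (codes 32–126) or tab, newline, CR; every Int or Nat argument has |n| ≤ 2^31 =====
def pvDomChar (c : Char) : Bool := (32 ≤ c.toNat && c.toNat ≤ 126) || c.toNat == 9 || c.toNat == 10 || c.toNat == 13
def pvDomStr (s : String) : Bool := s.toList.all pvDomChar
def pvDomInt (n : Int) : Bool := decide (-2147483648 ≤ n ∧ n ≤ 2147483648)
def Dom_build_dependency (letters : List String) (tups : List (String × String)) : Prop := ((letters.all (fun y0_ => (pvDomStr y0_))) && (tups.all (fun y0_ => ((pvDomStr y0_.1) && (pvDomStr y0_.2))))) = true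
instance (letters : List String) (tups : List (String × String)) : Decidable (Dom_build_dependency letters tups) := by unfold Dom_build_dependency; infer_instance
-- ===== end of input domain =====

-- B builds a predecessor index in one pass over tups and then projects it onto letters
-- (index-then-lookup) instead of rescanning all tuples for each letter; proved equal to A.


-- ===== PORT A =====
-- list += str spreads the string into one-character strings
def pvChars (a : String) : List String := a.toList.map (fun c => String.ofList [c])

def build_dependency (letters : List String) (tups : List (String × String)) : List (String × List String) :=
  (letters.foldl (fun depends letter =>
      tups.foldl (fun depends tup =>
          if letter == tup.2 then
            depends.insert tup.2 (depends.getD tup.2 [] ++ pvChars tup.1)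
          else depends)
        (depends.insert letter []))
    (PySem.Dict.empty : PySem.Dict String (List String))).items

-- ===== PORT B =====
def build_dependency_alt (letters : List String) (tups : List (String × String)) : List (String × List String) :=
  let index : PySem.Dict String (List String) :=
    tups.foldl (fun idx t => idx.modify t.2 [] (· ++ pvChars t.1)) PySem.Dict.empty
  (letters.foldl (fun d letter => d.insert letter (index.getD letter []))
    (PySem.Dict.empty : PySem.Dict String (List String))).items

-- ===== PRECONDITION & SPEC =====
def Spec_build_dependency (letters : List String) (tups : List (String × String)) (out : List (String × List String)) : Prop := out = build_dependency_alt letters tups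
instance (letters : List String) (tups : List (String × String)) (out : List (String × List String)) : Decidable (Spec_build_dependency letters tups out) := by unfold Spec_build_dependency; infer_instance

-- ===== CLAIM (what is proved, stated in full; the proofs are below) =====
def Claim_equal_build_dependency : Prop := ∀ (letters : List String) (tups : List (String × String)), Dom_build_dependency letters tups → Spec_build_dependency letters tups (build_dependency letters tups)

-- ===== LEMMAS AND PROOFS =====

-- all characters contributed to key l by the tuple list
def pvCollect (l : String) (tups : List (String × String)) : List String :=
  (tups.filter (fun t => t.2 == l)).flatMap (fun t => pvChars t.1)

theorem pvCollect_cons (l : String) (t : String × String) (rest : List (String × String)) :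
    pvCollect l (t :: rest) = (if t.2 == l then pvChars t.1 else []) ++ pvCollect l rest := by
  simp [pvCollect, List.filter_cons]
  split <;> simp

-- A's inner loop over tups only touches key l and appends pvCollect l tups to it
theorem pvInnerA (l : String) (tups : List (String × String))
    (d : PySem.Dict String (List String)) (v : List String) :
    tups.foldl (fun depends tup =>
        if l == tup.2 then
          depends.insert tup.2 (depends.getD tup.2 [] ++ pvChars tup.1)
        else depends) (d.insert l v)
      = d.insert l (v ++ pvCollect l tups) := by
  induction tups generalizing v with
  | nil => simp [pvCollect]
  | cons t rest ih =>
    simp only [List.foldl_cons]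
    by_cases h : l = t.2
    · subst h
      simp only [BEq.refl, if_true, PySem.Dict.getD_insert_self, PySem.Dict.insert_insert_self]
      rw [ih, pvCollect_cons]
      simp
    · have hb : (l == t.2) = false := by simp [h]
      simp only [hb, Bool.false_eq_true, if_false]
      rw [ih, pvCollect_cons]
      have : (t.2 == l) = false := by rw [beq_eq_false_iff_ne]; exact Ne.symm h
      simp [this]

-- B's index lookup returns exactly the collected characters
theorem pvIndexB (tups : List (String × String)) (idx : PySem.Dict String (List String))
    (l : String) :
    (tups.foldl (fun idx t => idx.modify t.2 [] (· ++ pvChars t.1)) idx).getD l []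
      = idx.getD l [] ++ pvCollect l tups := by
  induction tups generalizing idx with
  | nil => simp [pvCollect]
  | cons t rest ih =>
    simp only [List.foldl_cons]
    rw [ih, pvCollect_cons, PySem.Dict.getD_modify]
    by_cases h : l = t.2
    · subst h
      simp
    · have hb : (t.2 == l) = false := by rw [beq_eq_false_iff_ne]; exact Ne.symm h
      simp [h, hb]

-- two outer loops inserting pointwise-equal values build the same dict
theorem pvOuter (letters : List String) (f g : String → List String)
    (hfg : ∀ l, f l = g l) (d : PySem.Dict String (List String)) :
    letters.foldl (fun d l => d.insert l (f l)) d
      = letters.foldl (fun d l => d.insert l (g l)) d := by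
  simp only [hfg]

-- ===== VERDICT (by name: the statement is the Claim_ definition above) =====
theorem build_dependency_spec : Claim_equal_build_dependency := by
  intro letters tups _
  show build_dependency letters tups = build_dependency_alt letters tups
  unfold build_dependency build_dependency_alt
  congr 1
  have hstep : ∀ (d : PySem.Dict String (List String)) (letter : String),
      tups.foldl (fun depends tup =>
          if letter == tup.2 then
            depends.insert tup.2 (depends.getD tup.2 [] ++ pvChars tup.1)
          else depends) (d.insert letter [])
        = d.insert letter (pvCollect letter tups) := by
    intro d letter
    rw [pvInnerA]
    simp
  calc letters.foldl (fun depends letter =>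
          tups.foldl (fun depends tup =>
              if letter == tup.2 then
                depends.insert tup.2 (depends.getD tup.2 [] ++ pvChars tup.1)
              else depends) (depends.insert letter []))
        (PySem.Dict.empty : PySem.Dict String (List String))
      = letters.foldl (fun d l => d.insert l (pvCollect l tups)) PySem.Dict.empty := by
        apply PySem.List.foldl_congr_mem
        intro d l _
        exact hstep d l
    _ = _ := by
        apply pvOuter
        intro l
        rw [pvIndexB]
        simp
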